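-- pv_equiv track=rewrite | github.com/nishio/atcoder | dp/u.py | solve
-- ===== SOURCE A (Python) =====
-- def solve(N, M):
--     FULLBIT = (1 << N) - 1
--
--     def calcScore(S):
--         # debug("enter calcScore: S", S)
--         x = S
--         ret = 0
--         i = 0
--         while x:
--             if x & 1:
--                 # debug(": i", i)
--                 for j in range(i):
--                     if (S >> j) & 1:
--                         # debug(": i, j, M[i,j]", i, j, M[i, j])
--                         ret += M[i * N + j]
--             x //= 2
--             i += 1
--         # debug("leave calcScore: ret", ret)
--         return ret
--     groupScore = [calcScore(i) for i in range(1 << N)]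
--     # debug(": groupScore", groupScore)
--
--     table = [None] * (1 << N)
--
--     def sub(S):
--         ret = table[S]
--         if ret != None:
--             return ret
--         ret = groupScore[S]
--         x = (S - 1) & S
--         while x > 0:
--             y = (~x) & S
--             v = sub(x) + sub(y)
--             if v > ret:
--                 ret = v
--             x = (x - 1) & S
--         table[S] = ret
--         return ret
--
--     return sub(FULLBIT)
-- ===== SOURCE B (Python) =====
-- def solve(N, M):
--     full = (1 << N) - 1
--     # score[S] = total pairwise weight of the group S (same pairs A sums, computed by a direct double scan over bit positions)
--     score = [sum(M[i * N + j]
--                  for i in range(N) if (S >> i) & 1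
--                  for j in range(i) if (S >> j) & 1)
--              for S in range(1 << N)]
--     # bottom-up DP over masks in ascending order: every proper submask is final before it is used
--     dp = []
--     for S in range(1 << N):
--         best = score[S]
--         x = (S - 1) & S
--         while x > 0:
--             v = dp[x] + dp[S ^ x]
--             if v > best:
--                 best = v
--             x = (x - 1) & S
--         dp.append(best)
--     return dp[full]
-- ===== Notes on version B (the rewrite author's own statement) =====
-- stated objective: alternative
-- what changed: Replaces the memoized top-down recursion (closure + table of None sentinels) with a bottom-up iterative bitmask DP filled in ascending mask order, and computes the group scores by a direct double scan over bit positions instead of the bit-halving while loop.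
import Mathlib
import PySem

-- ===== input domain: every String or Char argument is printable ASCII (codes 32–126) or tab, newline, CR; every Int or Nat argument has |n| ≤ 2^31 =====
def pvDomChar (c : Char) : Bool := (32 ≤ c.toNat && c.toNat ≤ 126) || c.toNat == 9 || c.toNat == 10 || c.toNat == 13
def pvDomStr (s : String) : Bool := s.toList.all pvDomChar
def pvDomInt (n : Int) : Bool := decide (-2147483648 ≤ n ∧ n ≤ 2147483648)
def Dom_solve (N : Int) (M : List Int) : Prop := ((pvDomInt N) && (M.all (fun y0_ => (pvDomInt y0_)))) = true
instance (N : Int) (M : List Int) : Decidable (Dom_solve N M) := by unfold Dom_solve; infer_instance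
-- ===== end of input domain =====

-- B replaces A's memoized top-down recursion by a bottom-up iterative bitmask DP
-- (and a direct double bit-scan for the group scores); alternative decomposition, same values.
-- A's `table` is a pure memo cache (it never changes any returned value), so A's port
-- is the same recursion without the cache; A also only mutates its own local lists.

-- ===== PORT A =====
-- inner 'for j in range(i): if (S >> j) & 1: ret += M[i*N+j]'
-- (M[i*N+j] is in range under Pre_solve; pyGet? returns none exactly where Python raises IndexError)
def innerA (N : Int) (M : List Int) (S i : Nat) (ret : Int) : Int :=
  (List.range i).foldl
    (fun r j => if (S >>> j) % 2 = 1 then r + (PySem.List.pyGet? M ((i : Int) * N + (j : Int))).getD 0 else r)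
    ret

-- 'while x: if x & 1: <inner>; x //= 2; i += 1'
def calcGoA (N : Int) (M : List Int) (S x i : Nat) (ret : Int) : Int :=
  if h : x = 0 then ret
  else calcGoA N M S (x / 2) (i + 1) (if x % 2 = 1 then innerA N M S i ret else ret)
termination_by x
decreasing_by exact Nat.div_lt_self (Nat.pos_of_ne_zero h) one_lt_two

def calcScoreA (N : Int) (M : List Int) (S : Nat) : Int := calcGoA N M S S 0 0

mutual
-- sub(S) without the memo table (pure cache: identical values); fuel only makes the
-- recursion structural — fuel = S always suffices (every recursive call is on a smaller mask)
def subA (gs : List Int) (fuel S : Nat) : Int :=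
  match fuel with
  | 0 => gs.getD S 0
  | f + 1 => subGoA gs f S ((S - 1) &&& S) (gs.getD S 0)
termination_by (fuel, 0)

-- 'while x > 0: y = (~x) & S; v = sub(x) + sub(y); …; x = (x-1) & S'
-- x is always a submask of S here (x = … &&& S), where Python's (~x) & S equals S ^^^ x
def subGoA (gs : List Int) (f S x : Nat) (ret : Int) : Int :=
  if h : x = 0 then ret
  else
    let v := subA gs f x + subA gs f (S ^^^ x)
    subGoA gs f S ((x - 1) &&& S) (if v > ret then v else ret)
termination_by (f, x + 1)
decreasing_by
  · exact Prod.Lex.right f (Nat.succ_pos x)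
  · exact Prod.Lex.right f (Nat.succ_pos x)
  · exact Prod.Lex.right f (by
      have : (x - 1) &&& S ≤ x - 1 := Nat.and_le_left
      omega)
end

-- '1 << N' raises for N < 0 (excluded by Pre_solve); N.toNat is exact for 0 ≤ N
def solve (N : Int) (M : List Int) : Int :=
  let FULLBIT := (1 <<< N.toNat) - 1
  let groupScore := (List.range (1 <<< N.toNat)).map (calcScoreA N M)
  subA groupScore FULLBIT FULLBIT

-- ===== PORT B =====
-- score[S] = sum(M[i*N+j] for i in range(N) if (S>>i)&1 for j in range(i) if (S>>j)&1)
def scoreB (N : Int) (M : List Int) (S : Nat) : Int :=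
  (List.range N.toNat).foldl
    (fun s i =>
      if (S >>> i) % 2 = 1 then
        (List.range i).foldl
          (fun r j => if (S >>> j) % 2 = 1 then r + (PySem.List.pyGet? M ((i : Int) * N + (j : Int))).getD 0 else r)
          s
      else s)
    0

-- 'while x > 0: v = dp[x] + dp[S ^ x]; …; x = (x-1) & S'  (dp[·] in range: x, S^x < S = len(dp))
def bestGoB (dp : List Int) (S x : Nat) (best : Int) : Int :=
  if h : x = 0 then best
  else
    let v := dp.getD x 0 + dp.getD (S ^^^ x) 0
    bestGoB dp S ((x - 1) &&& S) (if v > best then v else best)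
termination_by x
decreasing_by
  have : (x - 1) &&& S ≤ x - 1 := Nat.and_le_left
  omega

def solve_alt (N : Int) (M : List Int) : Int :=
  let full := (1 <<< N.toNat) - 1
  let score := (List.range (1 <<< N.toNat)).map (scoreB N M)
  let dp := (List.range (1 <<< N.toNat)).foldl
    (fun dp S => dp ++ [bestGoB dp S ((S - 1) &&& S) (score.getD S 0)]) []
  dp.getD full 0

-- ===== PRECONDITION & SPEC =====
-- Exactly where Python A returns: N < 0 raises ValueError at '1 << N'; for N ≥ 2 the
-- group-score precomputation reads M[N*N-2], so len(M) ≤ N*N-2 raises IndexError.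
def Pre_solve (N : Int) (M : List Int) : Prop :=
  0 ≤ N ∧ (N ≤ 1 ∨ N * N - 1 ≤ (M.length : Int))
instance (N : Int) (M : List Int) : Decidable (Pre_solve N M) := by unfold Pre_solve; infer_instance

def pvWitness_solve : Int × List Int := (2, [1, 2, 5, 3])

def Spec_solve (N : Int) (M : List Int) (out : Int) : Prop := out = solve_alt N M
instance (N : Int) (M : List Int) (out : Int) : Decidable (Spec_solve N M out) := by unfold Spec_solve; infer_instance

-- ===== CLAIM (what is proved, stated in full; the proofs are below) =====
def Claim_equal_solve : Prop := ∀ (N : Int) (M : List Int), Dom_solve N M → Pre_solve N M → Spec_solve N M (solve N M)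

-- ===== LEMMAS AND PROOFS =====

-- generic conditional-add foldl
theorem foldl_condadd (c : Nat → Prop) [DecidablePred c] (f : Nat → Int) (l : List Nat) (a : Int) :
    l.foldl (fun s d => if c d then s + f d else s) a
      = a + (l.map (fun d => if c d then f d else 0)).sum := by
  have h : (fun (s : Int) d => if c d then s + f d else s)
      = fun s d => s + (if c d then f d else 0) := by
    funext s d; split <;> simp
  rw [h, PySem.List.foldl_add]

theorem innerA_shift (N : Int) (M : List Int) (S i : Nat) (a : Int) :
    innerA N M S i a = a + innerA N M S i 0 := by
  unfold innerA
  rw [foldl_condadd (fun j => (S >>> j) % 2 = 1), foldl_condadd (fun j => (S >>> j) % 2 = 1)]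
  ring
theorem calcGoA_shift (N : Int) (M : List Int) (S : Nat) :
    ∀ x i a, calcGoA N M S x i a = a + calcGoA N M S x i 0 := by
  intro x
  induction x using Nat.strong_induction_on with
  | _ x IH =>
    intro i a
    conv_lhs => rw [calcGoA]
    conv_rhs => rw [calcGoA]
    by_cases h : x = 0
    · simp [h]
    · simp only [h, dite_false]
      rw [IH (x / 2) (Nat.div_lt_self (Nat.pos_of_ne_zero h) one_lt_two) (i+1),
          IH (x / 2) (Nat.div_lt_self (Nat.pos_of_ne_zero h) one_lt_two) (i+1)
            (if x % 2 = 1 then innerA N M S i 0 else 0)]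
      split
      · rw [innerA_shift]; ring
      · ring
theorem calcGoA_sum (N : Int) (M : List Int) (S : Nat) :
    ∀ k x i, x < 2 ^ k →
      calcGoA N M S x i 0
        = ((List.range k).map
            (fun d => if (x >>> d) % 2 = 1 then innerA N M S (i + d) 0 else 0)).sum := by
  intro k
  induction k with
  | zero =>
    intro x i hx
    interval_cases x
    rw [calcGoA]; simp
  | succ k IH =>
    intro x i hx
    conv_lhs => rw [calcGoA]
    by_cases h : x = 0
    · simp [h, Nat.zero_shiftRight]
    · simp only [h, dite_false]
      rw [calcGoA_shift, IH (x / 2) (i + 1) (by omega)]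
      rw [List.range_succ_eq_map, List.map_cons, List.map_map, List.sum_cons]
      have hsh : ∀ d : Nat, x >>> (d + 1) = (x / 2) >>> d := by
        intro d
        simp [Nat.shiftRight_eq_div_pow, Nat.div_div_eq_div_mul, pow_succ, Nat.mul_comm]
      have hmap : (List.range k).map
            ((fun d => if (x >>> d) % 2 = 1 then innerA N M S (i + d) 0 else 0) ∘ Nat.succ)
          = (List.range k).map
            (fun d => if ((x / 2) >>> d) % 2 = 1 then innerA N M S (i + 1 + d) 0 else 0) := by
        apply List.map_congr_left
        intro d _
        simp only [Function.comp_apply, Nat.succ_eq_add_one, hsh]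
        have : i + (d + 1) = i + 1 + d := by omega
        rw [this]
      rw [hmap]
      have h0 : x >>> 0 = x := rfl
      simp only [h0]
      split <;> simp
theorem scoreB_eq (N : Int) (M : List Int) (S : Nat) (hS : S < 2 ^ N.toNat) :
    calcScoreA N M S = scoreB N M S := by
  unfold calcScoreA scoreB
  rw [calcGoA_sum N M S N.toNat S 0 hS]
  have hstep : ∀ (s : Int) (i : Nat),
      (if (S >>> i) % 2 = 1 then
        (List.range i).foldl
          (fun r j => if (S >>> j) % 2 = 1 then r + (PySem.List.pyGet? M ((i : Int) * N + (j : Int))).getD 0 else r)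
          s
      else s)
      = (if (S >>> i) % 2 = 1 then s + innerA N M S i 0 else s) := by
    intro s i
    split
    · exact innerA_shift N M S i s
    · rfl
  have hc := PySem.List.foldl_congr_mem
      (l := List.range N.toNat) (init := (0 : Int))
      (f := fun s i =>
        if (S >>> i) % 2 = 1 then
          (List.range i).foldl
            (fun r j => if (S >>> j) % 2 = 1 then r + (PySem.List.pyGet? M ((i : Int) * N + (j : Int))).getD 0 else r)
            s
        else s)
      (g := fun s i => if (S >>> i) % 2 = 1 then s + innerA N M S i 0 else s)
      (by intro acc x _; exact hstep acc x)
  rw [hc, foldl_condadd (fun i => (S >>> i) % 2 = 1)]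
  simp
theorem submask_le (a S : Nat) (h : a &&& S = a) : a ≤ S := by
  calc a = a &&& S := h.symm
    _ ≤ S := Nat.and_le_right

theorem and_mask (a S : Nat) : (a &&& S) &&& S = a &&& S := by
  rw [Nat.and_assoc, Nat.and_self]

theorem xor_mask (x S : Nat) (h : x &&& S = x) : (S ^^^ x) &&& S = S ^^^ x := by
  apply Nat.eq_of_testBit_eq
  intro i
  have hb : (x.testBit i && S.testBit i) = x.testBit i := by
    have hc := congrArg (fun n => n.testBit i) h
    simp only [Nat.testBit_and] at hc
    exact hc
  simp only [Nat.testBit_and, Nat.testBit_xor]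
  revert hb
  cases x.testBit i <;> cases S.testBit i <;> decide

theorem xor_submask_lt (x S : Nat) (hx : x ≠ 0) (h : x &&& S = x) : S ^^^ x < S := by
  have hle : S ^^^ x ≤ S := submask_le _ _ (xor_mask x S h)
  have hne : S ^^^ x ≠ S := by
    intro he
    apply hx
    have : S ^^^ (S ^^^ x) = S ^^^ S := by rw [he]
    simpa using this
  omega

theorem start_lt (S : Nat) (hS : S ≠ 0) : (S - 1) &&& S < S := by
  have : (S - 1) &&& S ≤ S - 1 := Nat.and_le_left
  omega

-- B's dp list after processing the first k masks
def dpL (sc : List Int) (k : Nat) : List Int :=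
  (List.range k).foldl
    (fun dp S => dp ++ [bestGoB dp S ((S - 1) &&& S) (sc.getD S 0)]) []

theorem dpL_succ (sc : List Int) (k : Nat) :
    dpL sc (k + 1) = dpL sc k ++ [bestGoB (dpL sc k) k ((k - 1) &&& k) (sc.getD k 0)] := by
  unfold dpL
  rw [List.range_succ, List.foldl_append]
  rfl

theorem dpL_length (sc : List Int) (k : Nat) : (dpL sc k).length = k := by
  induction k with
  | zero => rfl
  | succ k IH => rw [dpL_succ]; simp [IH]

theorem dpL_stable (sc : List Int) (j a b : Nat) (hj : j < a) (hab : a ≤ b) :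
    (dpL sc b).getD j 0 = (dpL sc a).getD j 0 := by
  induction b with
  | zero => omega
  | succ b IH =>
    by_cases h : a = b + 1
    · rw [h]
    · have hab' : a ≤ b := by omega
      rw [dpL_succ, ← IH hab']
      have hlen : j < (dpL sc b).length := by rw [dpL_length]; omega
      rw [List.getD_eq_getElem?_getD, List.getElem?_append_left hlen, ← List.getD_eq_getElem?_getD]

theorem dpL_getD_last (sc : List Int) (k : Nat) :
    (dpL sc (k + 1)).getD k 0 = bestGoB (dpL sc k) k ((k - 1) &&& k) (sc.getD k 0) := by
  have hlen : (dpL sc k).length = k := dpL_length sc k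
  rw [dpL_succ, List.getD_eq_getElem?_getD, List.getElem?_append_right (by rw [hlen])]
  simp [hlen]
theorem loopEq (gs : List Int) (S f : Nat)
    (IH : ∀ m, m < S → subA gs f m = (dpL gs S).getD m 0) :
    ∀ x r, x &&& S = x → x < S →
      subGoA gs f S x r = bestGoB (dpL gs S) S x r := by
  intro x
  induction x using Nat.strong_induction_on with
  | _ x IHx =>
    intro r hmask hlt
    conv_lhs => rw [subGoA]
    conv_rhs => rw [bestGoB]
    by_cases h : x = 0
    · simp [h]
    · simp only [h, dite_false]
      have hy : S ^^^ x < S := xor_submask_lt x S h hmask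
      have hxv : subA gs f x = (dpL gs S).getD x 0 := IH x hlt
      have hyv : subA gs f (S ^^^ x) = (dpL gs S).getD (S ^^^ x) 0 := IH _ hy
      rw [hxv, hyv]
      apply IHx ((x - 1) &&& S)
      · have : (x - 1) &&& S ≤ x - 1 := Nat.and_le_left
        omega
      · exact and_mask _ _
      · have : (x - 1) &&& S ≤ x - 1 := Nat.and_le_left
        omega

theorem subA_eq_dpL (gs : List Int) :
    ∀ S f, S ≤ f → subA gs f S = (dpL gs (S + 1)).getD S 0 := by
  intro S
  induction S using Nat.strong_induction_on with
  | _ S IH =>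
    intro f hf
    rw [dpL_getD_last]
    cases f with
    | zero =>
      have hS : S = 0 := by omega
      subst hS
      rw [subA, bestGoB]
      simp
    | succ f' =>
      rw [subA]
      by_cases hS0 : S = 0
      · subst hS0
        rw [subGoA, bestGoB]
        simp
      · apply loopEq gs S f'
        · intro m hm
          rw [IH m hm f' (by omega)]
          exact (dpL_stable gs m (m + 1) S (by omega) (by omega)).symm
        · exact and_mask _ _
        · exact start_lt S hS0
theorem solve_eq_alt (N : Int) (M : List Int) : solve N M = solve_alt N M := by
  unfold solve solve_alt
  have hsc : (List.range (1 <<< N.toNat)).map (scoreB N M)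
      = (List.range (1 <<< N.toNat)).map (calcScoreA N M) := by
    apply List.map_congr_left
    intro S hS
    rw [List.mem_range, Nat.shiftLeft_eq, one_mul] at hS
    exact (scoreB_eq N M S hS).symm
  rw [hsc]
  have hB : 1 ≤ 1 <<< N.toNat := by
    rw [Nat.shiftLeft_eq, one_mul]
    exact Nat.one_le_two_pow
  set G := (List.range (1 <<< N.toNat)).map (calcScoreA N M) with hG
  have hdp : (List.range (1 <<< N.toNat)).foldl
      (fun dp S => dp ++ [bestGoB dp S ((S - 1) &&& S) (G.getD S 0)]) []
      = dpL G (1 <<< N.toNat) := rfl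
  dsimp only
  rw [hdp]
  rw [subA_eq_dpL G (1 <<< N.toNat - 1) (1 <<< N.toNat - 1) (Nat.le_refl _)]
  rw [Nat.sub_add_cancel hB]

-- ===== VERDICT (by name: the statement is the Claim_ definition above) =====
theorem solve_spec : Claim_equal_solve := by
  intro N M _ _
  unfold Spec_solve
  exact solve_eq_alt N M
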